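-- pv_equiv track=rewrite | github.com/helldragger/TP_INFO_S3 | TP_reseaux/TP_1.py | nrzi
-- ===== SOURCE A (Python) =====
-- def nrzi(seq):
--     res = []
--     states = [-1, 1]
--     state = False
--     for char in seq:
--         if char == '1':
--             state = not state
--         res.append(states[int(state)])
--     return res
-- ===== SOURCE B (Python) =====
-- def nrzi(seq):
--     # run-length construction: find flip positions, then fill constant segments
--     n = len(seq)
--     flips = [i for i, c in enumerate(seq) if c == '1']
--     out = []
--     level = -1
--     prev = 0
--     for i in flips:
--         out += [level] * (i - prev)
--         level = -level
--         prev = i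
--     out += [level] * (n - prev)
--     return out
-- ===== Notes on version B (the rewrite author's own statement) =====
-- stated objective: alternative
-- what changed: Replaces the per-character toggle-and-append loop by a run-length construction: first collect the flip positions (indices of one-bits), then fill the output with constant-level segments between consecutive flip positions.
import Mathlib
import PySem

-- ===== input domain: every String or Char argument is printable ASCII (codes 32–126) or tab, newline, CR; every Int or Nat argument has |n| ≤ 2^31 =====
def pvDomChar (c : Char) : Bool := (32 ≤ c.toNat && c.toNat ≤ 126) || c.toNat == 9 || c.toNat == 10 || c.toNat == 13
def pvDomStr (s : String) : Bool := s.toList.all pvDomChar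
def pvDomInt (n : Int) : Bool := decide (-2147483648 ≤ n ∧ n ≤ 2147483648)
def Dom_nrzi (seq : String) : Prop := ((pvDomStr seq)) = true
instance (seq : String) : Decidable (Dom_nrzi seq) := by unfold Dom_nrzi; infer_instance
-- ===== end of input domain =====

-- B replaces A's per-character toggle loop by a run-length construction (flip
-- positions first, then constant segments); same cost, different algorithm.

-- ===== PORT A =====
-- A: single pass, boolean toggle, states-table lookup appended each step
def nrzi (seq : String) : List Int :=
  let states : List Int := [-1, 1]
  (seq.toList.foldl (fun (st : Bool × List Int) (c : Char) =>
      let state := if c = '1' then !st.1 else st.1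
      (state, st.2 ++ [(PySem.List.pyGet? states (if state then 1 else 0)).getD 0]))
    (false, [])).2

-- ===== PORT B =====
-- B: collect the indices of '1' characters, then fill constant-level segments
-- between consecutive flip positions
def nrzi_alt (seq : String) : List Int :=
  let n : Int := seq.toList.length
  let flips := (PySem.List.enumerate seq.toList).filterMap
      (fun ic => if ic.2 = '1' then some ic.1 else none)
  let st := flips.foldl (fun (st : List Int × Int × Int) (i : Int) =>
      (st.1 ++ List.replicate (i - st.2.2).toNat st.2.1, -st.2.1, i)) ([], -1, 0)
  st.1 ++ List.replicate (n - st.2.2).toNat st.2.1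

-- ===== PRECONDITION & SPEC =====
def Spec_nrzi (seq : String) (out : List Int) : Prop := out = nrzi_alt seq
instance (seq : String) (out : List Int) : Decidable (Spec_nrzi seq out) := by unfold Spec_nrzi; infer_instance

-- ===== CLAIM (what is proved, stated in full; the proofs are below) =====
def Claim_equal_nrzi : Prop := ∀ (seq : String), Dom_nrzi seq → Spec_nrzi seq (nrzi seq)

-- ===== LEMMAS AND PROOFS =====

-- reference output: the current line level, recursively
def nrziSpecRef (lvl : Int) : List Char → List Int
  | [] => []
  | c :: t => if c = '1' then (-lvl) :: nrziSpecRef (-lvl) t else lvl :: nrziSpecRef lvl t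

-- flip positions of a suffix whose first character sits at index k
def flipsFrom (k : Int) : List Char → List Int
  | [] => []
  | c :: t => (if c = '1' then [k] else []) ++ flipsFrom (k + 1) t

lemma enum_flips (l : List Char) : ∀ (k : Int),
    (PySem.List.enumerate l k).filterMap (fun ic => if ic.2 = '1' then some ic.1 else none)
      = flipsFrom k l := by
  induction l with
  | nil => intro k; simp [flipsFrom, PySem.List.enumerate_nil]
  | cons c t ih =>
    intro k
    by_cases hc : c = '1' <;>
      simp [flipsFrom, PySem.List.enumerate_cons, hc, ih]

-- A's fold appends the reference output
lemma nrzi_fold_eq (l : List Char) : ∀ (b : Bool) (acc : List Int),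
    (l.foldl (fun (st : Bool × List Int) (c : Char) =>
        let state := if c = '1' then !st.1 else st.1
        (state, st.2 ++ [(PySem.List.pyGet? ([-1, 1] : List Int) (if state then 1 else 0)).getD 0]))
      (b, acc)).2
    = acc ++ nrziSpecRef (if b then 1 else -1) l := by
  induction l with
  | nil => intro b acc; simp [nrziSpecRef]
  | cons c t ih =>
    intro b acc
    simp only [List.foldl_cons]
    rw [ih]
    by_cases hc : c = '1' <;> cases b <;>
      simp [nrziSpecRef, hc, PySem.List.pyGet?, PySem.List.pyIdx?]

-- B's segment fold builds the reference output
lemma nrzi_alt_fold_eq (t : List Char) : ∀ (lvl : Int) (k p : Int) (acc : List Int), p ≤ k →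
    (let st := (flipsFrom k t).foldl (fun (st : List Int × Int × Int) (i : Int) =>
        (st.1 ++ List.replicate (i - st.2.2).toNat st.2.1, -st.2.1, i)) (acc, lvl, p)
     st.1 ++ List.replicate ((k + t.length : Int) - st.2.2).toNat st.2.1)
    = acc ++ List.replicate (k - p).toNat lvl ++ nrziSpecRef lvl t := by
  induction t with
  | nil => intro lvl k p acc hpk; simp [flipsFrom, nrziSpecRef]
  | cons c t ih =>
    intro lvl k p acc hpk
    have hsucc : ((k + 1) - p).toNat = (k - p).toNat + 1 := by omega
    by_cases hc : c = '1'
    · simp only [flipsFrom, hc, if_pos, List.singleton_append, List.foldl_cons,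
        List.length_cons, Nat.cast_add, Nat.cast_one]
      have h2 := ih (-lvl) (k + 1) k (acc ++ List.replicate (k - p).toNat lvl) (by omega)
      rw [show (k + ((t.length : Int) + 1)) = (k + 1) + (t.length : Int) by ring]
      rw [h2]
      have h1 : ((k + 1) - k : Int).toNat = 1 := by omega
      simp [nrziSpecRef, List.append_assoc]
    · simp only [flipsFrom, hc, if_neg, not_false_iff, List.nil_append,
        List.length_cons, Nat.cast_add, Nat.cast_one]
      have h2 := ih lvl (k + 1) p acc (by omega)
      rw [show (k + ((t.length : Int) + 1)) = (k + 1) + (t.length : Int) by ring]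
      rw [h2, hsucc, List.replicate_succ']
      simp [nrziSpecRef, hc, List.append_assoc]

-- ===== VERDICT (by name: the statement is the Claim_ definition above) =====
theorem nrzi_spec : Claim_equal_nrzi := by
  intro seq _
  unfold Spec_nrzi nrzi nrzi_alt
  rw [nrzi_fold_eq, enum_flips]
  have h := nrzi_alt_fold_eq seq.toList (-1) 0 0 [] le_rfl
  simp only [zero_add] at h
  simpa using h.symm
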